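-- pv_equiv track=rewrite | github.com/Francais0620/Pipelines | lineage/consensusFretch.py | get_iupac_from_frequencies
-- ===== SOURCE A (Python) =====
-- IUPAC_CODES = {
--     frozenset(['A']): 'A',
--     frozenset(['C']): 'C',
--     frozenset(['G']): 'G',
--     frozenset(['T']): 'T',
--     frozenset(['-']): '-',  # GAP
--     frozenset(['A', 'G']): 'R',
--     frozenset(['C', 'T']): 'Y',
--     frozenset(['G', 'C']): 'S',
--     frozenset(['A', 'T']): 'W',
--     frozenset(['G', 'T']): 'K',
--     frozenset(['A', 'C']): 'M',
--     frozenset(['C', 'G', 'T']): 'B',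
--     frozenset(['A', 'G', 'T']): 'D',
--     frozenset(['A', 'C', 'T']): 'H',
--     frozenset(['A', 'C', 'G']): 'V',
--     frozenset(['A', 'C', 'G', 'T']): 'N',
-- }
--
-- def get_iupac_from_frequencies(freqs):
--     sorted_bases = sorted(freqs.items(), key=lambda x: x[1], reverse=True)
--     max_freq = sorted_bases[0][1]
--     selected_bases = {base.upper() for base, freq in sorted_bases if freq == max_freq}
--
--     # 如果 GAP 存在但不是唯一最高频率，排除 GAP
--     if '-' in selected_bases and len(selected_bases) > 1:
--         selected_bases.remove('-')
--
--     # 如果只有一个碱基具有最高频率，直接返回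
--     if len(selected_bases) == 1:
--         return next(iter(selected_bases))
--
--     # 返回对应的 IUPAC 符号
--     iupac = IUPAC_CODES.get(frozenset(selected_bases), 'N')
--     return iupac.upper()
-- ===== SOURCE B (Python) =====
-- _STEP_CODE = {
--     "A": "A", "C": "C", "G": "G", "T": "T",
--     "AC": "M", "AG": "R", "AT": "W", "CG": "S", "CT": "Y", "GT": "K",
--     "ACG": "V", "ACT": "H", "AGT": "D", "CGT": "B", "ACGT": "N",
-- }
--
--
-- def get_iupac_from_frequencies(freqs):
--     # one pass over the dict keeping the running maximum and its bases
--     best = None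
--     sel = set()
--     for base, freq in freqs.items():
--         if best is None or freq > best:
--             best = freq
--             sel = {base.upper()}
--         elif freq == best:
--             sel.add(base.upper())
--
--     # a gap never wins a tie
--     if len(sel) > 1:
--         sel.discard('-')
--
--     if len(sel) == 1:
--         return next(iter(sel))
--
--     # encode the winning set as the sorted ACGT string and look it up
--     if not sel <= {'A', 'C', 'G', 'T'}:
--         return 'N'
--     key = ''.join(b for b in 'ACGT' if b in sel)
--     return _STEP_CODE.get(key, 'N')
-- ===== Notes on version B (the rewrite author's own statement) =====
-- stated objective: alternative
-- what changed: B replaces A's full sort with a single fold that tracks the running maximum frequency and its set of bases, and replaces the frozenset-keyed IUPAC table by a subset test plus a lookup keyed by the selection written as its sorted ACGT string.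
import Mathlib
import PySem

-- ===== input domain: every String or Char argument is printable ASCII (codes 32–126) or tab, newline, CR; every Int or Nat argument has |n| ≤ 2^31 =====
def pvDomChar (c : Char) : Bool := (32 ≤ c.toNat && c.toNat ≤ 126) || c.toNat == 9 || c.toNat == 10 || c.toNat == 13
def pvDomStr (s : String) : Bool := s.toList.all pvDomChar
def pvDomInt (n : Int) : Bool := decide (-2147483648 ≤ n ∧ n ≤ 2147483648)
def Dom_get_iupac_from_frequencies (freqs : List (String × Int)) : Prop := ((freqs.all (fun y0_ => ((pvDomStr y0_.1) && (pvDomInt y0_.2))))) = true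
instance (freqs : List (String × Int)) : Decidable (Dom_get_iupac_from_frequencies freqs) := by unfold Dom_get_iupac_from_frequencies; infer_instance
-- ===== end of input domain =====

-- B folds once over the dict keeping the running maximum and its bases (instead of sorting) and
-- looks the winning set up by its sorted ACGT string (instead of a frozenset-keyed table): no sort, one pass.

-- ===== PORT A =====
-- module constant IUPAC_CODES: keys are frozensets, modelled as element lists; looked up by set equality
def iupacCodes : List (List String × String) :=
  [(["A"], "A"), (["C"], "C"), (["G"], "G"), (["T"], "T"), (["-"], "-"),
   (["A", "G"], "R"), (["C", "T"], "Y"), (["G", "C"], "S"), (["A", "T"], "W"),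
   (["G", "T"], "K"), (["A", "C"], "M"), (["C", "G", "T"], "B"), (["A", "G", "T"], "D"),
   (["A", "C", "T"], "H"), (["A", "C", "G"], "V"), (["A", "C", "G", "T"], "N")]

-- IUPAC_CODES.get(s, dflt): first (= only) key equal AS A SET, else the default
def iupacGet (s : PySem.Set String) (dflt : String) : String :=
  match iupacCodes.find? (fun kv => PySem.Set.equal (PySem.Set.ofList kv.1) s) with
  | some kv => kv.2
  | none => dflt

def get_iupac_from_frequencies (freqs : List (String × Int)) : String :=
  let sorted_bases := PySem.List.sorted freqs (fun x => x.2) true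
  match sorted_bases with
  | [] => ""  -- Python raises IndexError on sorted_bases[0]; excluded by Pre_
  | top :: _ =>
    let max_freq := top.2
    let selected := PySem.Set.ofList
      ((sorted_bases.filter (fun x => x.2 == max_freq)).map (fun x => PySem.Str.upper x.1))
    let selected :=
      if PySem.Set.contains selected "-" && decide (1 < PySem.Set.len selected) then
        (PySem.Set.remove? selected "-").getD selected  -- .remove: exact under the membership guard
      else selected
    if PySem.Set.len selected == 1 then selected.headD ""  -- next(iter(s)) on a singleton
    else PySem.Str.upper (iupacGet selected "N")

-- ===== PORT B =====
-- module constant _STEP_CODE of Source B: a dict keyed by the selection written in ACGT order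
def stepCode : PySem.Dict String String :=
  PySem.Dict.ofList
    [("A", "A"), ("C", "C"), ("G", "G"), ("T", "T"),
     ("AC", "M"), ("AG", "R"), ("AT", "W"), ("CG", "S"), ("CT", "Y"), ("GT", "K"),
     ("ACG", "V"), ("ACT", "H"), ("AGT", "D"), ("CGT", "B"), ("ACGT", "N")]

-- loop body of Source B: state = (best so far or None, set of uppercased bases achieving it)
def altStep (st : Option Int × PySem.Set String) (x : String × Int) : Option Int × PySem.Set String :=
  match st.1 with
  | none => (some x.2, PySem.Set.ofList [PySem.Str.upper x.1])
  | some best =>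
    if best < x.2 then (some x.2, PySem.Set.ofList [PySem.Str.upper x.1])
    else if x.2 == best then (st.1, PySem.Set.add st.2 (PySem.Str.upper x.1))
    else st

def get_iupac_from_frequencies_alt (freqs : List (String × Int)) : String :=
  let st := freqs.foldl altStep (none, PySem.Set.empty)
  let sel := if decide (1 < PySem.Set.len st.2) then PySem.Set.discard st.2 "-" else st.2
  if PySem.Set.len sel == 1 then sel.headD ""  -- next(iter(sel)) on a singleton
  else if !(PySem.Set.issubset sel ["A", "C", "G", "T"]) then "N"
  else PySem.Dict.getD stepCode
    (PySem.Str.join "" ((["A", "C", "G", "T"] : List String).filter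
      (fun b => PySem.Set.contains sel b))) "N"

-- ===== PRECONDITION & SPEC =====
-- Pre_ excludes the empty dict (A raises IndexError on sorted_bases[0]) and association lists with
-- duplicate keys (the Python argument is a dict, whose keys are unique).
def Pre_get_iupac_from_frequencies (freqs : List (String × Int)) : Prop :=
  freqs ≠ [] ∧ (freqs.map Prod.fst).Nodup
instance (freqs : List (String × Int)) : Decidable (Pre_get_iupac_from_frequencies freqs) := by
  unfold Pre_get_iupac_from_frequencies; infer_instance

def pvWitness_get_iupac_from_frequencies : (List (String × Int)) := [("a", 1), ("g", 1)]

def Spec_get_iupac_from_frequencies (freqs : List (String × Int)) (out : String) : Prop := out = get_iupac_from_frequencies_alt freqs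
instance (freqs : List (String × Int)) (out : String) : Decidable (Spec_get_iupac_from_frequencies freqs out) := by unfold Spec_get_iupac_from_frequencies; infer_instance

-- ===== CLAIM (what is proved, stated in full; the proofs are below) =====
def Claim_equal_get_iupac_from_frequencies : Prop := ∀ (freqs : List (String × Int)), Dom_get_iupac_from_frequencies freqs → Pre_get_iupac_from_frequencies freqs → Spec_get_iupac_from_frequencies freqs (get_iupac_from_frequencies freqs)

-- ===== LEMMAS AND PROOFS =====

-- the IUPAC lookup compares keys as sets, so it depends only on the membership of s
lemma iupacGet_mem_congr (s t : List String) (h : ∀ x, x ∈ s ↔ x ∈ t) (dflt : String) :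
    iupacGet s dflt = iupacGet t dflt := by
  have hiff : ∀ u : List String, PySem.Set.equal u s = PySem.Set.equal u t := by
    intro u
    by_cases hu : PySem.Set.equal u s = true
    · rw [hu]
      exact ((PySem.Set.equal_iff u t).mpr
        (fun x => ((PySem.Set.equal_iff u s).mp hu x).trans (h x))).symm
    · have h' : ¬ PySem.Set.equal u t = true := fun ht =>
        hu ((PySem.Set.equal_iff u s).mpr
          (fun x => ((PySem.Set.equal_iff u t).mp ht x).trans (h x).symm))
      rw [Bool.not_eq_true] at hu h'
      rw [hu, h']
  have hfe : (fun kv : List String × String => PySem.Set.equal (PySem.Set.ofList kv.1) s)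
           = (fun kv : List String × String => PySem.Set.equal (PySem.Set.ofList kv.1) t) :=
    funext fun kv => hiff _
  unfold iupacGet
  rw [hfe]

-- every string occurring in an IUPAC key
lemma iupac_keys_sub : ∀ kv ∈ iupacCodes, ∀ x ∈ kv.1, x ∈ (["A", "C", "G", "T", "-"] : List String) := by
  decide

-- on every subset of {A,C,G,T} (as an ordered sublist) the two lookup mechanisms agree
lemma code_eq : ∀ P ∈ (["A", "C", "G", "T"] : List String).sublists,
    PySem.Str.upper (iupacGet P "N") = PySem.Dict.getD stepCode (PySem.Str.join "" P) "N" := by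
  decide

-- A's frozenset lookup equals B's subset-test + sorted-string lookup, given equal membership and no gap
lemma lookup_eq (s t : List String) (hmem : ∀ x, x ∈ s ↔ x ∈ t) (hds : "-" ∉ s) :
    PySem.Str.upper (iupacGet s "N")
  = (if !(PySem.Set.issubset t ["A", "C", "G", "T"]) then "N"
     else PySem.Dict.getD stepCode
       (PySem.Str.join "" ((["A", "C", "G", "T"] : List String).filter
         (fun b => PySem.Set.contains t b))) "N") := by
  by_cases hsub : ∀ x ∈ s, x ∈ (["A", "C", "G", "T"] : List String)
  · have hsubt : PySem.Set.issubset t ["A", "C", "G", "T"] = true :=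
      (PySem.Set.issubset_iff _ _).mpr (fun x hx => hsub x ((hmem x).mpr hx))
    rw [hsubt]
    simp only [Bool.not_true, Bool.false_eq_true, if_false]
    have hf : (["A", "C", "G", "T"] : List String).filter (fun b => PySem.Set.contains t b)
            = (["A", "C", "G", "T"] : List String).filter (fun b => decide (b ∈ s)) := by
      refine List.filter_congr ?_
      intro b _
      by_cases hbs : b ∈ s
      · rw [(PySem.Set.contains_iff t b).mpr ((hmem b).mp hbs), decide_eq_true hbs]
      · have ht : b ∉ t := fun hbt => hbs ((hmem b).mpr hbt)
        have : PySem.Set.contains t b = false := by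
          rcases Bool.eq_false_or_eq_true (PySem.Set.contains t b) with htr | hf
          · exact absurd ((PySem.Set.contains_iff t b).mp htr) ht
          · exact hf
        rw [this, decide_eq_false hbs]
    have hPmem : ∀ x, x ∈ s ↔ x ∈ (["A", "C", "G", "T"] : List String).filter (fun b => decide (b ∈ s)) := by
      intro x
      rw [List.mem_filter]
      constructor
      · exact fun hx => ⟨hsub x hx, decide_eq_true hx⟩
      · exact fun ⟨_, hx⟩ => of_decide_eq_true hx
    rw [hf, iupacGet_mem_congr s _ hPmem]
    exact code_eq _ (List.mem_sublists.mpr List.filter_sublist)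
  · rw [not_forall] at hsub
    obtain ⟨b, hb⟩ := hsub
    rw [Classical.not_imp] at hb
    obtain ⟨hbs, hbn⟩ := hb
    have hA : iupacGet s "N" = "N" := by
      unfold iupacGet
      rw [List.find?_eq_none.mpr ?_]
      intro kv hkv
      simp only [Bool.not_eq_true]
      rcases Bool.eq_false_or_eq_true (PySem.Set.equal (PySem.Set.ofList kv.1) s) with htr | hf
      case inr => exact hf
      · exfalso
        have hbk : b ∈ PySem.Set.ofList kv.1 :=
          ((PySem.Set.equal_iff _ _).mp htr b).mpr hbs
        have hbk' : b ∈ kv.1 := (PySem.Set.mem_ofList _ _).mp hbk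
        have := iupac_keys_sub kv hkv b hbk'
        simp only [List.mem_cons, List.not_mem_nil, or_false] at this hbn
        rcases this with h | h | h | h | h
        · exact hbn (Or.inl h)
        · exact hbn (Or.inr (Or.inl h))
        · exact hbn (Or.inr (Or.inr (Or.inl h)))
        · exact hbn (Or.inr (Or.inr (Or.inr h)))
        · exact hds (h ▸ hbs)
    have hsubt : PySem.Set.issubset t ["A", "C", "G", "T"] = false := by
      rcases Bool.eq_false_or_eq_true (PySem.Set.issubset t ["A", "C", "G", "T"]) with htr | hf
      · exact absurd ((PySem.Set.issubset_iff _ _).mp htr b ((hmem b).mp hbs)) hbn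
      · exact hf
    rw [hA, hsubt]
    simp only [Bool.not_false, if_true]
    decide

-- invariant of Source B's single pass: after the loop, best is the maximum and sel holds exactly
-- the uppercased bases achieving it
lemma fold_inv (l : List (String × Int)) (hne : l ≠ []) :
    ∃ m sel, l.foldl altStep (none, PySem.Set.empty) = (some m, sel) ∧
      sel.Nodup ∧ (∀ p ∈ l, p.2 ≤ m) ∧ (∃ p ∈ l, p.2 = m) ∧
      (∀ x, x ∈ sel ↔ ∃ p ∈ l, p.2 = m ∧ PySem.Str.upper p.1 = x) := by
  induction l using List.reverseRecOn with
  | nil => exact absurd rfl hne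
  | append_singleton l y ih =>
    rw [List.foldl_append, List.foldl_cons, List.foldl_nil]
    rcases eq_or_ne l [] with rfl | hl
    · refine ⟨y.2, PySem.Set.ofList [PySem.Str.upper y.1], rfl, PySem.Set.nodup_ofList _, ?_, ?_, ?_⟩
      · intro p hp
        simp only [List.nil_append, List.mem_singleton] at hp
        exact hp ▸ le_refl _
      · exact ⟨y, by simp, rfl⟩
      · intro x
        rw [PySem.Set.mem_ofList]
        simp only [List.nil_append, List.mem_singleton]
        constructor
        · exact fun hx => ⟨y, rfl, rfl, hx.symm⟩
        · rintro ⟨p, rfl, _, hpx⟩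
          exact hpx.symm
    · obtain ⟨m, sel, hf, hnd, hub, hex, hmem⟩ := ih hl
      rw [hf]
      by_cases hlt : m < y.2
      · refine ⟨y.2, PySem.Set.ofList [PySem.Str.upper y.1], ?_, PySem.Set.nodup_ofList _, ?_, ?_, ?_⟩
        · simp [altStep, hlt]
        · intro p hp
          rcases List.mem_append.mp hp with h | h
          · exact le_of_lt (lt_of_le_of_lt (hub p h) hlt)
          · simp only [List.mem_singleton] at h
            exact h ▸ le_refl _
        · exact ⟨y, by simp, rfl⟩
        · intro x
          rw [PySem.Set.mem_ofList]
          simp only [List.mem_singleton]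
          constructor
          · exact fun hx => ⟨y, by simp, rfl, hx.symm⟩
          · rintro ⟨p, hp, hpm, hpx⟩
            rcases List.mem_append.mp hp with h | h
            · exact absurd (hpm ▸ hub p h) (not_le.mpr hlt)
            · simp only [List.mem_singleton] at h
              exact (h ▸ hpx).symm
      · by_cases heq : y.2 = m
        · refine ⟨m, PySem.Set.add sel (PySem.Str.upper y.1), ?_, PySem.Set.nodup_add _ _ hnd, ?_, ?_, ?_⟩
          · simp [altStep, heq]
          · intro p hp
            rcases List.mem_append.mp hp with h | h
            · exact hub p h
            · simp only [List.mem_singleton] at h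
              exact h ▸ le_of_eq heq
          · obtain ⟨p, hp, hpm⟩ := hex
            exact ⟨p, List.mem_append.mpr (Or.inl hp), hpm⟩
          · intro x
            rw [PySem.Set.mem_add]
            constructor
            · rintro (hx | hx)
              · obtain ⟨p, hp, hpm, hpx⟩ := (hmem x).mp hx
                exact ⟨p, List.mem_append.mpr (Or.inl hp), hpm, hpx⟩
              · exact ⟨y, by simp, heq, hx.symm⟩
            · rintro ⟨p, hp, hpm, hpx⟩
              rcases List.mem_append.mp hp with h | h
              · exact Or.inl ((hmem x).mpr ⟨p, h, hpm, hpx⟩)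
              · simp only [List.mem_singleton] at h
                exact Or.inr (h ▸ hpx).symm
        · refine ⟨m, sel, ?_, hnd, ?_, ?_, ?_⟩
          · simp [altStep, hlt, heq]
          · intro p hp
            rcases List.mem_append.mp hp with h | h
            · exact hub p h
            · simp only [List.mem_singleton] at h
              exact h ▸ le_of_not_gt hlt
          · obtain ⟨p, hp, hpm⟩ := hex
            exact ⟨p, List.mem_append.mpr (Or.inl hp), hpm⟩
          · intro x
            rw [hmem x]
            constructor
            · rintro ⟨p, hp, hpm, hpx⟩
              exact ⟨p, List.mem_append.mpr (Or.inl hp), hpm, hpx⟩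
            · rintro ⟨p, hp, hpm, hpx⟩
              rcases List.mem_append.mp hp with h | h
              · exact ⟨p, h, hpm, hpx⟩
              · simp only [List.mem_singleton] at h
                exact absurd (h ▸ hpm) heq

-- the shared tail of the two programs (gap removal, singleton return, code lookup) agrees on any two
-- nodup lists with the same members
lemma tail_eq (s t : List String) (hsn : s.Nodup) (htn : t.Nodup) (hmem : ∀ x, x ∈ s ↔ x ∈ t) :
    (let s' := if PySem.Set.contains s "-" && decide (1 < PySem.Set.len s)
               then (PySem.Set.remove? s "-").getD s else s
     if PySem.Set.len s' == 1 then s'.headD "" else PySem.Str.upper (iupacGet s' "N"))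
  = (let t' := if decide (1 < PySem.Set.len t) then PySem.Set.discard t "-" else t
     if PySem.Set.len t' == 1 then t'.headD ""
     else if !(PySem.Set.issubset t' ["A", "C", "G", "T"]) then "N"
     else PySem.Dict.getD stepCode
       (PySem.Str.join "" ((["A", "C", "G", "T"] : List String).filter
         (fun b => PySem.Set.contains t' b))) "N") := by
  have hlen : s.length = t.length :=
    ((List.perm_ext_iff_of_nodup hsn htn).mpr hmem).length_eq
  -- compute the two post-gap sets and their common properties
  obtain ⟨s', t', hs', ht', hsn', htn', hmem', hds'⟩ :
      ∃ s' t', (if PySem.Set.contains s "-" && decide (1 < PySem.Set.len s)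
                then (PySem.Set.remove? s "-").getD s else s) = s' ∧
        (if decide (1 < PySem.Set.len t) then PySem.Set.discard t "-" else t) = t' ∧
        s'.Nodup ∧ t'.Nodup ∧ (∀ x, x ∈ s' ↔ x ∈ t') ∧ (s'.length ≠ 1 → "-" ∉ s') := by
    by_cases h1 : 1 < s.length
    · have h1s : decide (1 < PySem.Set.len s) = true := by
        simp only [PySem.Set.len, decide_eq_true_eq]
        exact_mod_cast h1
      have h1t : decide (1 < PySem.Set.len t) = true := by
        simp only [PySem.Set.len, decide_eq_true_eq]
        omega
      by_cases hc : "-" ∈ s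
      · refine ⟨PySem.Set.discard s "-", PySem.Set.discard t "-", ?_, by rw [h1t]; rfl,
          PySem.Set.nodup_discard s "-" hsn, PySem.Set.nodup_discard t "-" htn, ?_, ?_⟩
        · rw [(PySem.Set.contains_iff s "-").mpr hc, h1s]
          simp only [Bool.and_self]
          rw [if_pos trivial, PySem.Set.remove?_of_mem hc, Option.getD_some]
        · intro x
          rw [PySem.Set.mem_discard, PySem.Set.mem_discard, hmem x]
        · intro _ hm
          exact ((PySem.Set.mem_discard s "-" "-").mp hm).2 rfl
      · have hcf : PySem.Set.contains s "-" = false := by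
          rcases Bool.eq_false_or_eq_true (PySem.Set.contains s "-") with htr | hf
          · exact absurd ((PySem.Set.contains_iff s "-").mp htr) hc
          · exact hf
        refine ⟨s, PySem.Set.discard t "-", by rw [hcf]; simp, by rw [h1t]; rfl,
          hsn, PySem.Set.nodup_discard t "-" htn, ?_, fun _ => hc⟩
        intro x
        rw [PySem.Set.mem_discard]
        constructor
        · intro hx
          exact ⟨(hmem x).mp hx, fun hxe => hc (hxe ▸ hx)⟩
        · exact fun hx => (hmem x).mpr hx.1
    · have h1s : decide (1 < PySem.Set.len s) = false := by
        simp only [PySem.Set.len, decide_eq_false_iff_not]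
        exact_mod_cast h1
      have h1t : decide (1 < PySem.Set.len t) = false := by
        simp only [PySem.Set.len, decide_eq_false_iff_not]
        omega
      refine ⟨s, t, by rw [h1s]; simp, by rw [h1t]; rfl, hsn, htn, hmem, ?_⟩
      intro hne1
      have hs0 : s.length = 0 := by omega
      rw [List.length_eq_zero_iff] at hs0
      subst hs0
      exact List.not_mem_nil
  simp only []
  rw [hs', ht']
  have hlen' : s'.length = t'.length :=
    ((List.perm_ext_iff_of_nodup hsn' htn').mpr hmem').length_eq
  by_cases hl1 : s'.length = 1
  · match s', hl1 with
    | [a], _ =>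
      have : t' = [a] := List.perm_singleton.mp
        (((List.perm_ext_iff_of_nodup hsn' htn').mpr hmem').symm)
      subst this
      rfl
  · have e1 : (PySem.Set.len s' == 1) = false := by
      simp only [PySem.Set.len, beq_eq_false_iff_ne, ne_eq]
      omega
    have e2 : (PySem.Set.len t' == 1) = false := by
      simp only [PySem.Set.len, beq_eq_false_iff_ne, ne_eq]
      omega
    rw [e1, e2]
    simp only [Bool.false_eq_true, if_false]
    exact lookup_eq s' t' hmem' (hds' hl1)

-- ===== VERDICT (by name: the statement is the Claim_ definition above) =====
theorem get_iupac_from_frequencies_spec : Claim_equal_get_iupac_from_frequencies := by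
  intro freqs hdom hpre
  obtain ⟨hne, -⟩ := hpre
  unfold Spec_get_iupac_from_frequencies
  obtain ⟨m, selB, hfold, hnodB, hub, ⟨q, hq, hqm⟩, hmemB⟩ := fold_inv freqs hne
  rcases hs : PySem.List.sorted freqs (fun x => x.2) true with _ | ⟨top, tl⟩
  · exact absurd ((PySem.List.sorted_eq_nil_iff _ _ _).mp hs) hne
  have htopmem : top ∈ freqs := (PySem.List.mem_sorted _ _ _ _).mp
    (by rw [hs]; exact List.mem_cons_self)
  have hubA : ∀ y ∈ freqs, y.2 ≤ top.2 := PySem.List.key_head_sorted_rev_ge freqs _ hs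
  have hmtop : m = top.2 := le_antisymm (hqm ▸ hubA q hq) (hub top htopmem)
  unfold get_iupac_from_frequencies get_iupac_from_frequencies_alt
  rw [hs, hfold]
  simp only []
  refine tail_eq _ _ (PySem.Set.nodup_ofList _) hnodB ?_
  intro x
  rw [PySem.Set.mem_ofList, hmemB x]
  simp only [List.mem_map, List.mem_filter]
  constructor
  · rintro ⟨p, ⟨hp, hpm⟩, hpx⟩
    have hpm' : p.2 = top.2 := by simpa using hpm
    exact ⟨p, (PySem.List.mem_sorted _ _ _ _).mp (hs ▸ hp), by rw [hpm', hmtop], hpx⟩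
  · rintro ⟨p, hp, hpm, hpx⟩
    refine ⟨p, ⟨?_, ?_⟩, hpx⟩
    · rw [← hs]
      exact (PySem.List.mem_sorted _ _ _ _).mpr hp
    · simp [hpm, hmtop]
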